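-- pv_equiv track=rewrite | github.com/coandco/advent2025 | advent2025_day06.py | cephalopod_columns
-- ===== SOURCE A (Python) =====
-- def cephalopod_columns(lines: list[str]) -> list[list[int]]:
--     columns, column = [], []
--     for raw_column in ("".join(x).strip() for x in zip(*lines)):
--         # If we've hit an index that's all blank, that's it for the problem and move onto the next
--         if not raw_column:
--             columns.append(column)
--             column = []
--             continue
--         column.append(int(raw_column))
--     # Make sure we append the last column
--     columns.append(column)
--     return columns
-- ===== SOURCE B (Python) =====
-- def cephalopod_columns(lines: list[str]) -> list[list[int]]:
--     cols = ["".join(x).strip() for x in zip(*lines)]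
--     seps = [i for i, c in enumerate(cols) if not c]
--     groups = []
--     start = 0
--     for i in seps:
--         groups.append([int(c) for c in cols[start:i]])
--         start = i + 1
--     groups.append([int(c) for c in cols[start:]])
--     return groups
-- ===== Notes on version B (the rewrite author's own statement) =====
-- stated objective: alternative
-- what changed: B precomputes the list of blank-column separator indices and builds each group by slicing between consecutive separators, instead of flushing a mutable accumulator while scanning.
import Mathlib
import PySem

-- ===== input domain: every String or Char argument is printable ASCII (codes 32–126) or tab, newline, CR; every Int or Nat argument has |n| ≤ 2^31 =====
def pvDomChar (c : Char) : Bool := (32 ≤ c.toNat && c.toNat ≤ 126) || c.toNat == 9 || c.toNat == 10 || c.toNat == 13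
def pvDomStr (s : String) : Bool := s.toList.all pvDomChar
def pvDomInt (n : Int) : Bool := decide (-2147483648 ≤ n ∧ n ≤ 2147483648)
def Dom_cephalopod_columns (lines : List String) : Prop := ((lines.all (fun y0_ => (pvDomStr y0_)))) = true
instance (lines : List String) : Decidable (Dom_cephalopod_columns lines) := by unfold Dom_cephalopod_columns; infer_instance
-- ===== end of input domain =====

-- B builds the groups by slicing between precomputed blank-column separator indices
-- instead of flushing a running accumulator; same cost, different decomposition.

-- Shared by both ports (both Pythons contain '"".join(x).strip() for x in zip(*lines)' literally):
-- the stripped transposed columns; zip(*lines) truncates to the shortest line (empty for no lines).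
def pvCols (lines : List String) : List String :=
  let ls := lines.map String.toList
  let n := (ls.map List.length).min?.getD 0
  (List.range n).map (fun i => PySem.Str.strip (String.ofList (ls.map (fun l => l.getD i ' '))))

-- int(raw_column); under Pre_ the parse always succeeds, so the default is never used.
def pvParse (s : String) : Int := (PySem.Int.ofStr? s).getD 0

-- ===== PORT A =====
def cephalopod_columns (lines : List String) : List (List Int) :=
  let fin := (pvCols lines).foldl
    (fun (st : List (List Int) × List Int) raw =>
      if raw = "" then (st.1 ++ [st.2], [])
      else (st.1, st.2 ++ [pvParse raw]))
    ([], [])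
  fin.1 ++ [fin.2]

-- ===== PORT B =====
-- cols[start:i] with Nat start ≤ i is exactly (cols.drop start).take (i - start) (PySem.List.slice_natCast).
def cephalopod_columns_alt (lines : List String) : List (List Int) :=
  let cols := pvCols lines
  let seps := (List.range cols.length).filter (fun i => cols.getD i "" = "")
  let fin := seps.foldl
    (fun (st : List (List Int) × Nat) i =>
      (st.1 ++ [((cols.drop st.2).take (i - st.2)).map pvParse], i + 1))
    ([], 0)
  fin.1 ++ [(cols.drop fin.2).map pvParse]

-- ===== PRECONDITION & SPEC =====
-- Pre_ excludes exactly the inputs where A raises ValueError: a non-blank stripped column that int() cannot parse.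
def Pre_cephalopod_columns (lines : List String) : Prop :=
  ∀ c ∈ pvCols lines, c ≠ "" → (PySem.Int.ofStr? c).isSome
instance (lines : List String) : Decidable (Pre_cephalopod_columns lines) := by
  unfold Pre_cephalopod_columns; infer_instance
def pvWitness_cephalopod_columns : List String := ["1 2", "3 4"]

def Spec_cephalopod_columns (lines : List String) (out : List (List Int)) : Prop :=
  out = cephalopod_columns_alt lines
instance (lines : List String) (out : List (List Int)) : Decidable (Spec_cephalopod_columns lines out) := by
  unfold Spec_cephalopod_columns; infer_instance

-- ===== CLAIM (what is proved, stated in full; the proofs are below) =====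
def Claim_equal_cephalopod_columns : Prop := ∀ (lines : List String), Dom_cephalopod_columns lines → Pre_cephalopod_columns lines → Spec_cephalopod_columns lines (cephalopod_columns lines)

-- ===== LEMMAS AND PROOFS =====

-- Intermediate characterisation: split the column list at blanks, parsing the rest.
def pvSplit : List String → List (List Int)
  | [] => [[]]
  | c :: cs =>
    if c = "" then [] :: pvSplit cs
    else (pvParse c :: (pvSplit cs).headI) :: (pvSplit cs).tail

theorem pvSplit_ne_nil (cs : List String) : pvSplit cs ≠ [] := by
  cases cs with
  | nil => simp [pvSplit]
  | cons c cs => unfold pvSplit; split_ifs <;> simp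

theorem pvSplit_cons_head_tail (cs : List String) :
    (pvSplit cs).headI :: (pvSplit cs).tail = pvSplit cs := by
  cases h : pvSplit cs with
  | nil => exact absurd h (pvSplit_ne_nil cs)
  | cons a t => simp

-- A's fold, with general accumulators.
theorem pvA_fold (cols : List String) :
    ∀ (acc : List (List Int)) (cur : List Int),
    (cols.foldl
        (fun (st : List (List Int) × List Int) raw =>
          if raw = "" then (st.1 ++ [st.2], [])
          else (st.1, st.2 ++ [pvParse raw])) (acc, cur)).1
      ++ [(cols.foldl
        (fun (st : List (List Int) × List Int) raw =>
          if raw = "" then (st.1 ++ [st.2], [])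
          else (st.1, st.2 ++ [pvParse raw])) (acc, cur)).2]
    = acc ++ ((cur ++ (pvSplit cols).headI) :: (pvSplit cols).tail) := by
  induction cols with
  | nil => intro acc cur; simp [pvSplit]
  | cons c cs ih =>
    intro acc cur
    by_cases h : c = ""
    · simp only [List.foldl_cons, pvSplit, if_pos h]
      rw [ih]
      simp [pvSplit_cons_head_tail]
    · simp only [List.foldl_cons, pvSplit, if_neg h]
      rw [ih]
      simp

-- B's machinery, named for the proofs (definitionally the body of cephalopod_columns_alt).
def pvSepsOf (cols : List String) : List Nat :=
  (List.range cols.length).filter (fun i => cols.getD i "" = "")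

def pvBfold (cols : List String) (st : List (List Int) × Nat) (seps : List Nat) :
    List (List Int) × Nat :=
  seps.foldl
    (fun (st : List (List Int) × Nat) i =>
      (st.1 ++ [((cols.drop st.2).take (i - st.2)).map pvParse], i + 1)) st

def pvBcore (cols : List String) : List (List Int) :=
  (pvBfold cols ([], 0) (pvSepsOf cols)).1
    ++ [(cols.drop (pvBfold cols ([], 0) (pvSepsOf cols)).2).map pvParse]

theorem pvAlt_eq_pvBcore (lines : List String) :
    cephalopod_columns_alt lines = pvBcore (pvCols lines) := rfl

theorem pvBfold_cons (cols : List String) (st : List (List Int) × Nat) (i : Nat)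
    (rest : List Nat) :
    pvBfold cols st (i :: rest)
      = pvBfold cols (st.1 ++ [((cols.drop st.2).take (i - st.2)).map pvParse], i + 1) rest := rfl

theorem pvBfold_acc (cols : List String) (seps : List Nat) :
    ∀ (a : List (List Int)) (s : Nat),
    pvBfold cols (a, s) seps
      = (a ++ (pvBfold cols ([], s) seps).1, (pvBfold cols ([], s) seps).2) := by
  induction seps with
  | nil => intro a s; simp [pvBfold]
  | cons i rest ih =>
    intro a s
    rw [pvBfold_cons, pvBfold_cons]
    simp only [List.nil_append]
    rw [ih (a ++ _) (i + 1), ih ([((cols.drop s).take (i - s)).map pvParse]) (i + 1)]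
    simp

theorem pvBfold_shift (c : String) (cols : List String) (seps : List Nat) :
    ∀ (a : List (List Int)) (s : Nat),
    pvBfold (c :: cols) (a, s + 1) (seps.map (· + 1))
      = ((pvBfold cols (a, s) seps).1, (pvBfold cols (a, s) seps).2 + 1) := by
  induction seps with
  | nil => intro a s; simp [pvBfold]
  | cons i rest ih =>
    intro a s
    simp only [List.map_cons]
    rw [pvBfold_cons, pvBfold_cons]
    have h1 : (((c :: cols).drop (s + 1)).take (i + 1 - (s + 1)) : List String)
        = (cols.drop s).take (i - s) := by simp
    simp only [List.drop_succ_cons, Nat.add_sub_add_right]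
    exact ih _ (i + 1)

theorem pvSepsOf_cons (c : String) (cols : List String) :
    pvSepsOf (c :: cols)
      = (if c = "" then [0] else []) ++ (pvSepsOf cols).map (· + 1) := by
  unfold pvSepsOf
  rw [show (c :: cols).length = cols.length + 1 from rfl, List.range_succ_eq_map,
    List.filter_cons]
  have hmap : (List.map Nat.succ (List.range cols.length)).filter
      (fun i => decide ((c :: cols).getD i "" = ""))
      = ((List.range cols.length).filter (fun i => decide (cols.getD i "" = ""))).map Nat.succ := by
    rw [List.filter_map]; rfl
  rw [hmap]
  have h2 : (Nat.succ : Nat → Nat) = (· + 1) := by funext n; rfl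
  by_cases h : c = "" <;> simp [h, h2]

theorem pvBcore_blank (cs : List String) : pvBcore ("" :: cs) = [] :: pvBcore cs := by
  have hif : pvSepsOf ("" :: cs) = 0 :: (pvSepsOf cs).map (· + 1) := by
    rw [pvSepsOf_cons]; simp
  simp only [pvBcore, hif, pvBfold_cons]
  simp only [List.drop_zero, Nat.sub_self, List.take_zero, List.map_nil, List.nil_append]
  rw [pvBfold_shift "" cs (pvSepsOf cs) [[]] 0,
    pvBfold_acc cs (pvSepsOf cs) [[]] 0]
  simp [List.drop_succ_cons]

theorem pvBcore_ne (c : String) (cs : List String) (h : c ≠ "") :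
    pvBcore (c :: cs) = (pvParse c :: (pvBcore cs).headI) :: (pvBcore cs).tail := by
  cases hs : pvSepsOf cs with
  | nil =>
    simp only [pvBcore, pvSepsOf_cons, if_neg h, List.nil_append, hs, List.map_nil, pvBfold]
    simp
  | cons i rest =>
    have hcs : pvBcore cs
        = ((cs.take i).map pvParse)
          :: ((pvBfold cs ([], i + 1) rest).1
              ++ [(cs.drop (pvBfold cs ([], i + 1) rest).2).map pvParse]) := by
      simp only [pvBcore, hs, pvBfold_cons]
      simp only [List.drop_zero, Nat.sub_zero, List.nil_append]
      rw [pvBfold_acc cs rest ([(cs.take i).map pvParse]) (i + 1)]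
      simp
    have hccs : pvBcore (c :: cs)
        = (pvParse c :: (cs.take i).map pvParse)
          :: ((pvBfold cs ([], i + 1) rest).1
              ++ [(cs.drop (pvBfold cs ([], i + 1) rest).2).map pvParse]) := by
      simp only [pvBcore, pvSepsOf_cons, if_neg h, List.nil_append, hs, List.map_cons,
        pvBfold_cons]
      simp only [List.drop_zero, Nat.sub_zero, List.take_succ_cons, List.map_cons]
      rw [pvBfold_shift c cs rest ([pvParse c :: (cs.take i).map pvParse]) (i + 1),
        pvBfold_acc cs rest ([pvParse c :: (cs.take i).map pvParse]) (i + 1)]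
      simp [List.drop_succ_cons]
    rw [hccs, hcs]
    simp

theorem pvBcore_eq_pvSplit (cols : List String) : pvBcore cols = pvSplit cols := by
  induction cols with
  | nil => simp [pvBcore, pvSepsOf, pvBfold, pvSplit]
  | cons c cs ih =>
    by_cases h : c = ""
    · subst h; rw [pvBcore_blank, ih]; simp [pvSplit]
    · rw [pvBcore_ne c cs h, ih]; simp [pvSplit, if_neg h]

-- ===== VERDICT (by name: the statement is the Claim_ definition above) =====
theorem cephalopod_columns_spec : Claim_equal_cephalopod_columns := by
  intro lines _ _
  show cephalopod_columns lines = cephalopod_columns_alt lines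
  rw [pvAlt_eq_pvBcore, pvBcore_eq_pvSplit]
  have h := pvA_fold (pvCols lines) [] []
  simp only [List.nil_append] at h
  rw [pvSplit_cons_head_tail] at h
  exact h
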